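-- pv_equiv track=rewrite | github.com/fenwaypowers/Placeback-Solution | placeback.py | solution
-- ===== SOURCE A (Python) =====
-- def solution(sequence):
--   values = {}
--   for i in range(len(sequence)):
--     values[sequence[i]] = i + 1
--
--   values = dict(sorted(values.items(), key=lambda x: x))
--   solution = []
--   for i in values:
--     solution.append(values[i])
--
--   return solution
-- ===== SOURCE B (Python) =====
-- def solution(sequence):
--     pairs = sorted((v, i + 1) for i, v in enumerate(sequence))
--     out = []
--     for (v, p), (w, _) in zip(pairs, pairs[1:]):
--         if v != w:
--             out.append(p)
--     if pairs:
--         out.append(pairs[-1][1])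
--     return out
-- ===== Notes on version B (the rewrite author's own statement) =====
-- stated objective: alternative
-- what changed: B never builds a dict or a seen-set: it sorts ALL (value, position) pairs lexicographically and keeps the last pair of each equal-value run (adjacent-pair scan), whereas A builds a value->last-position dict and sorts its k distinct items.
import Mathlib
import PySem

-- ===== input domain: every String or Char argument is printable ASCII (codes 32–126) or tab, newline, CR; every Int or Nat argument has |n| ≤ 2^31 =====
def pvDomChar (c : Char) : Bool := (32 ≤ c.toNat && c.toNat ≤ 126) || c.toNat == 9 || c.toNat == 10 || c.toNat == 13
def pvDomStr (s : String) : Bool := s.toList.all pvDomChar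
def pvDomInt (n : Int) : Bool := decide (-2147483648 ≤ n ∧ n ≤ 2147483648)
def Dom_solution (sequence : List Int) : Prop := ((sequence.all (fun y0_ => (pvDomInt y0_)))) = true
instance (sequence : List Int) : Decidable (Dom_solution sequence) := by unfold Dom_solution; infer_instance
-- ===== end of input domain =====

-- B sorts ALL (value, position) pairs lexicographically and keeps the last pair of each
-- equal-value run by an adjacent-pair scan, instead of A's value->last-position dict whose
-- sorted items are re-read; alternative algorithm, same result.

-- ===== PORT A =====
def solution (sequence : List Int) : List Int :=
  -- values = {}; for i in range(len(sequence)): values[sequence[i]] = i + 1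
  let values : PySem.Dict Int Int :=
    (PySem.List.pyRange 0 (PySem.List.len sequence) 1).foldl
      (fun d i => d.insert (PySem.List.pyGetD sequence i 0) (i + 1)) PySem.Dict.empty
  -- values = dict(sorted(values.items(), key=lambda x: x))
  let values2 : PySem.Dict Int Int :=
    PySem.Dict.ofList (PySem.List.sorted2 values.items (fun x => x.1) (fun x => x.2))
  -- for i in values: solution.append(values[i])   (values[i] never raises: i ranges over the keys)
  values2.keys.foldl (fun acc i => acc ++ [values2.getD i 0]) []

-- ===== PORT B =====
def solution_alt (sequence : List Int) : List Int :=
  -- pairs = sorted((v, i + 1) for i, v in enumerate(sequence))   (tuples compare lexicographically)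
  let pairs : List (Int × Int) :=
    PySem.List.sorted2 ((PySem.List.enumerate sequence 0).map (fun p => (p.2, p.1 + 1)))
      (fun x => x.1) (fun x => x.2)
  -- for (v, p), (w, _) in zip(pairs, pairs[1:]): if v != w: out.append(p)
  let out : List Int :=
    (pairs.zip (PySem.List.slice pairs (some 1) none)).foldl
      (fun out pq => if pq.1.1 ≠ pq.2.1 then out ++ [pq.1.2] else out) []
  -- if pairs: out.append(pairs[-1][1])   (pairs[-1] in range: pairs is nonempty there)
  if pairs.isEmpty then out else out ++ [(PySem.List.pyGetD pairs (-1) (0, 0)).2]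

-- ===== PRECONDITION & SPEC =====
def Spec_solution (sequence : List Int) (out : List Int) : Prop := out = solution_alt sequence
instance (sequence : List Int) (out : List Int) : Decidable (Spec_solution sequence out) := by unfold Spec_solution; infer_instance

-- ===== CLAIM (what is proved, stated in full; the proofs are below) =====
def Claim_equal_solution : Prop := ∀ (sequence : List Int), Dom_solution sequence → Spec_solution sequence (solution sequence)

-- ===== LEMMAS AND PROOFS =====

-- the list of (value, position) pairs B sorts
def pvP (xs : List Int) : List (Int × Int) :=
  (PySem.List.enumerate xs 0).map (fun p => (p.2, p.1 + 1))

-- A's dict-building loop, over that pair list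
def pvDictA (xs : List Int) : PySem.Dict Int Int :=
  (pvP xs).foldl (fun d p => d.insert p.1 p.2) PySem.Dict.empty

-- strict lexicographic order on pairs (Python tuple '<')
def pvLexLt (a b : Int × Int) : Prop := a.1 < b.1 ∨ (a.1 = b.1 ∧ a.2 < b.2)

-- B's sorted pair list
def pvS (xs : List Int) : List (Int × Int) :=
  PySem.List.sorted2 (pvP xs) (fun x => x.1) (fun x => x.2)

-- keep the last element of each run of equal first components
def pvLastRun : List (Int × Int) → List (Int × Int)
  | [] => []
  | [x] => [x]
  | x :: y :: t => if x.1 = y.1 then pvLastRun (y :: t) else x :: pvLastRun (y :: t)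

theorem pv_insertBy_congr (b₁ b₂ : (Int × Int) → (Int × Int) → Bool) (x : Int × Int)
    (acc : List (Int × Int)) (h : ∀ c ∈ acc, b₁ x c = b₂ x c) :
    PySem.List.insertBy b₁ x acc = PySem.List.insertBy b₂ x acc := by
  induction acc with
  | nil => rfl
  | cons y ys ih =>
    simp only [PySem.List.insertBy]
    rw [h y (by simp)]
    split
    · rfl
    · rw [ih (fun c hc => h c (by simp [hc]))]

theorem pv_foldl_insertBy_congr (b₁ b₂ : (Int × Int) → (Int × Int) → Bool)
    (xs acc : List (Int × Int))
    (h : ∀ a, (a ∈ xs ∨ a ∈ acc) → ∀ c, (c ∈ xs ∨ c ∈ acc) → b₁ a c = b₂ a c) :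
    xs.foldl (fun acc x => PySem.List.insertBy b₁ x acc) acc
      = xs.foldl (fun acc x => PySem.List.insertBy b₂ x acc) acc := by
  induction xs generalizing acc with
  | nil => rfl
  | cons x t ih =>
    simp only [List.foldl_cons]
    rw [pv_insertBy_congr b₁ b₂ x acc (fun c hc => h x (by simp) c (Or.inr hc))]
    have conv : ∀ a : Int × Int, (a ∈ t ∨ a ∈ PySem.List.insertBy b₂ x acc) →
        (a ∈ x :: t ∨ a ∈ acc) := by
      intro a ha
      rcases ha with ha | ha
      · exact Or.inl (by simp [ha])
      · rcases (PySem.List.insertBy_mem_iff _ _ _ _).mp ha with h' | h'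
        · exact Or.inl (by simp [h'])
        · exact Or.inr h'
    exact ih _ (fun a ha c hc => h a (conv a ha) c (conv c hc))

-- sorting pairs by the pair (tuple key) = sorting by the first component, when firsts are distinct
theorem pv_sorted2_eq_sorted_fst (L : List (Int × Int)) (h : (L.map Prod.fst).Nodup) :
    PySem.List.sorted2 L (fun x => x.1) (fun x => x.2) = PySem.List.sorted L (fun x => x.1) := by
  have hinj := List.inj_on_of_nodup_map h
  show L.foldl (fun acc x => PySem.List.insertBy
      (fun a b => decide (a.1 < b.1) || !decide (b.1 < a.1) && decide (a.2 < b.2)) x acc) []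
    = L.foldl (fun acc x => PySem.List.insertBy (fun a b => decide (a.1 < b.1)) x acc) []
  apply pv_foldl_insertBy_congr
  intro a ha c hc
  simp only [List.mem_nil_iff, or_false] at ha hc
  by_cases h1 : a.1 < c.1
  · simp [h1]
  · by_cases h2 : c.1 < a.1
    · simp [h1, h2]
    · have : a = c := hinj ha hc (by omega)
      subst this
      simp

-- sorting pairs by the tuple key IS sorting by the lexicographic key
theorem pv_sorted2_eq_sorted_lex (L : List (Int × Int)) :
    PySem.List.sorted2 L (fun x => x.1) (fun x => x.2)
      = PySem.List.sorted L (fun p => toLex p) := by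
  rw [PySem.List.sorted_eq_foldl_insertBy]
  show L.foldl (fun acc x => PySem.List.insertBy
      (fun a b => decide (a.1 < b.1) || !decide (b.1 < a.1) && decide (a.2 < b.2)) x acc) []
    = L.foldl (fun acc x => PySem.List.insertBy
      (fun a b => decide (toLex a < toLex b)) x acc) []
  apply pv_foldl_insertBy_congr
  intro a _ c _
  by_cases h1 : a.1 < c.1 <;> by_cases h2 : c.1 < a.1 <;> by_cases h3 : a.2 < c.2 <;>
    simp [h1, h2, h3, Prod.Lex.toLex_lt_toLex] <;> omega

theorem pv_dict_fold_get? (L : List (Int × Int)) (d : PySem.Dict Int Int) (v : Int) :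
    (L.foldl (fun d p => d.insert p.1 p.2) d).get? v
      = ((L.reverse.find? (fun p => p.1 == v)).map (fun p => p.2)).or (d.get? v) := by
  induction L generalizing d with
  | nil => simp
  | cons p t ih =>
    simp only [List.foldl_cons, List.reverse_cons, List.find?_append, ih, Option.map_or,
      Option.or_assoc]
    congr 1
    rw [PySem.Dict.get?_insert]
    by_cases hv : v = p.1
    · simp [hv, List.find?, Option.or]
    · rw [List.find?, show (p.1 == v) = false by simp [Ne.symm hv]]
      simp [hv, Option.or]

theorem pv_getA (xs : List Int) (v : Int) :
    (pvDictA xs).get? v = ((pvP xs).reverse.find? (fun p => p.1 == v)).map (fun p => p.2) := by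
  rw [pvDictA, pv_dict_fold_get?]
  simp

theorem pv_nodup_keysA (xs : List Int) : (pvDictA xs).keys.Nodup := by
  unfold pvDictA
  exact PySem.Dict.nodup_keys_foldl_insert_key _ (fun p : Int × Int => p.1)
    (fun _ p => p.2) _ (by simp [PySem.Dict.keys_empty])

-- positions strictly increase along pvP
theorem pv_P_pairwise_snd (xs : List Int) : (pvP xs).Pairwise (fun a b => a.2 < b.2) := by
  unfold pvP
  exact (PySem.List.pairwise_lt_enumerate xs 0).map _ (fun h => by omega)

theorem pv_P_nodup (xs : List Int) : (pvP xs).Nodup :=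
  (pv_P_pairwise_snd xs).imp (fun h he => by rw [he] at h; omega)

-- the first (in reverse) match of a key in a snd-increasing pair list is its max-position pair
theorem pv_last_match (L : List (Int × Int)) : ∀ (v q : Int),
    L.Pairwise (fun a b => a.2 < b.2) →
    (((L.reverse.find? (fun p => p.1 == v)).map (fun p => p.2) = some q)
      ↔ ((v, q) ∈ L ∧ ∀ p ∈ L, p.1 = v → p.2 ≤ q)) := by
  induction L with
  | nil => intro v q _; simp
  | cons a t ih =>
    intro v q h
    rw [List.pairwise_cons] at h
    obtain ⟨ha, ht⟩ := h
    rw [List.reverse_cons, List.find?_append]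
    cases hf : t.reverse.find? (fun p => p.1 == v) with
    | some p0 =>
      have hp0t : p0 ∈ t := List.mem_reverse.mp (List.mem_of_find?_eq_some hf)
      have hp0v : p0.1 = v := by simpa using List.find?_some hf
      obtain ⟨hmem, hmax⟩ := (ih v p0.2 ht).mp (by rw [hf]; rfl)
      rw [show (some p0).or (List.find? (fun p => p.1 == v) [a]) = some p0 from rfl]
      simp only [Option.map_some, Option.some.injEq]
      constructor
      · intro hq
        subst hq
        refine ⟨List.mem_cons_of_mem _ hmem, ?_⟩
        intro p hp hpv
        rcases List.mem_cons.mp hp with hpe | hp'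
        · have h1 : p.2 = a.2 := congrArg Prod.snd hpe
          have h2 : a.2 < p0.2 := ha p0 hp0t
          omega
        · exact hmax p hp' hpv
      · rintro ⟨hmem', hmax'⟩
        rcases List.mem_cons.mp hmem' with hpe | hmem''
        · exfalso
          have h1 : p0.2 ≤ q := hmax' p0 (List.mem_cons_of_mem _ hp0t) hp0v
          have h2 : a.2 < p0.2 := ha p0 hp0t
          have h3 : q = a.2 := congrArg Prod.snd hpe
          omega
        · have h1 : q ≤ p0.2 := hmax (v, q) hmem'' rfl
          have h2 : p0.2 ≤ q := hmax' p0 (List.mem_cons_of_mem _ hp0t) hp0v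
          omega
    | none =>
      have hnone : ∀ p ∈ t, p.1 ≠ v := by
        intro p hp
        have := List.find?_eq_none.mp hf p (List.mem_reverse.mpr hp)
        simpa using this
      rw [show (Option.none).or (List.find? (fun p => p.1 == v) [a])
            = List.find? (fun p => p.1 == v) [a] from rfl]
      by_cases hav : a.1 = v
      · rw [List.find?_cons_of_pos (by simp [hav])]
        simp only [Option.map_some, Option.some.injEq]
        constructor
        · intro hq
          subst hq
          refine ⟨by rw [← hav]; exact List.mem_cons.mpr (Or.inl Prod.mk.eta.symm), ?_⟩
          intro p hp hpv
          rcases List.mem_cons.mp hp with hpe | hp'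
          · have h1 : p.2 = a.2 := congrArg Prod.snd hpe
            omega
          · exact absurd hpv (hnone p hp')
        · rintro ⟨hmem', _⟩
          rcases List.mem_cons.mp hmem' with hpe | hmem''
          · exact (congrArg Prod.snd hpe).symm
          · exact absurd rfl (hnone _ hmem'')
      · rw [List.find?_cons_of_neg (by simp [hav]), List.find?_nil]
        constructor
        · intro h; exact absurd h (by simp)
        · rintro ⟨hmem', _⟩
          rcases List.mem_cons.mp hmem' with hpe | hmem''
          · exact absurd (congrArg Prod.fst hpe).symm hav
          · exact absurd rfl (hnone _ hmem'')

theorem pv_items_mem (xs : List Int) (v q : Int) :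
    (v, q) ∈ (pvDictA xs).items
      ↔ ((v, q) ∈ pvP xs ∧ ∀ p ∈ pvP xs, p.1 = v → p.2 ≤ q) := by
  rw [← PySem.Dict.get?_eq_some_iff_mem_items _ _ _ (pv_nodup_keysA xs), pv_getA,
    pv_last_match (pvP xs) v q (pv_P_pairwise_snd xs)]

theorem pv_S_perm (xs : List Int) : (pvS xs).Perm (pvP xs) :=
  PySem.List.sorted2_perm (pvP xs) _ _ false

theorem pv_S_pairwise (xs : List Int) : (pvS xs).Pairwise pvLexLt := by
  have h1 : pvS xs = PySem.List.sorted (pvP xs) (fun p => toLex p) :=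
    pv_sorted2_eq_sorted_lex _
  have hle : (pvS xs).Pairwise (fun a b => toLex a ≤ toLex b) := by
    rw [h1]; exact PySem.List.sorted_pairwise _ _
  have hnd : (pvS xs).Nodup := ((pv_S_perm xs).nodup_iff).mpr (pv_P_nodup xs)
  have := hle.and hnd
  refine this.imp ?_
  rintro a b ⟨h1', h2'⟩
  have hlt : toLex a < toLex b := lt_of_le_of_ne h1' (fun he => h2' (toLex.injective he))
  exact Prod.Lex.toLex_lt_toLex.mp hlt

theorem pv_lastRun_subset (L : List (Int × Int)) : ∀ p ∈ pvLastRun L, p ∈ L := by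
  induction L with
  | nil => simp [pvLastRun]
  | cons x t ih =>
    cases t with
    | nil => simp [pvLastRun]
    | cons y t' =>
      intro p hp
      rw [pvLastRun] at hp
      split at hp
      · exact List.mem_cons_of_mem _ (ih p hp)
      · rcases List.mem_cons.mp hp with rfl | hp
        · exact List.mem_cons_self
        · exact List.mem_cons_of_mem _ (ih p hp)

-- in a lex-sorted list whose head differs from the next key, everything after has a larger key
theorem pv_head_lt (x y : Int × Int) (t : List (Int × Int))
    (h : (x :: y :: t).Pairwise pvLexLt) (hne : x.1 ≠ y.1) :
    ∀ p ∈ y :: t, x.1 < p.1 := by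
  rw [List.pairwise_cons] at h
  obtain ⟨hx, h⟩ := h
  rw [List.pairwise_cons] at h
  obtain ⟨hy, _⟩ := h
  have hxy : x.1 < y.1 := by
    rcases hx y (by simp) with h' | ⟨h', _⟩
    · exact h'
    · exact absurd h' hne
  intro p hp
  rcases List.mem_cons.mp hp with rfl | hp
  · exact hxy
  · have := hy p hp
    rcases this with h' | ⟨h', _⟩ <;>
      rcases hx p (List.mem_cons_of_mem _ hp) with h'' | ⟨h'', _⟩ <;> omega

theorem pv_lastRun_mem (L : List (Int × Int)) : ∀ (v q : Int), L.Pairwise pvLexLt →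
    ((v, q) ∈ pvLastRun L ↔ ((v, q) ∈ L ∧ ∀ p ∈ L, p.1 = v → p.2 ≤ q)) := by
  induction L with
  | nil => intro v q _; simp [pvLastRun]
  | cons x t ih =>
    intro v q h
    cases t with
    | nil =>
      simp only [pvLastRun, List.mem_singleton]
      constructor
      · intro hm
        have hq : q = x.2 := congrArg Prod.snd hm
        refine ⟨by simp [hm], ?_⟩
        intro p hp _
        have h1 : p.2 = x.2 := congrArg Prod.snd hp
        omega
      · rintro ⟨hm, _⟩
        simpa using hm
    | cons y t' =>
      have hx : ∀ p ∈ y :: t', pvLexLt x p := (List.pairwise_cons.mp h).1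
      have ht : (y :: t').Pairwise pvLexLt := (List.pairwise_cons.mp h).2
      simp only [pvLastRun]
      by_cases he : x.1 = y.1
      · rw [if_pos he, ih v q ht]
        have hxy2 : x.2 < y.2 := by
          rcases hx y (by simp) with h' | ⟨_, h'⟩
          · omega
          · exact h'
        constructor
        · rintro ⟨hmem, hmax⟩
          refine ⟨List.mem_cons_of_mem _ hmem, ?_⟩
          intro p hp hpv
          rcases List.mem_cons.mp hp with hpe | hp'
          · have h1 : p.2 = x.2 := congrArg Prod.snd hpe
            have h2 : p.1 = x.1 := congrArg Prod.fst hpe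
            have h3 : y.2 ≤ q := hmax y (by simp) (by omega)
            omega
          · exact hmax p hp' hpv
        · rintro ⟨hmem, hmax⟩
          rcases List.mem_cons.mp hmem with hpe | hmem'
          · exfalso
            have hv : v = x.1 := congrArg Prod.fst hpe
            have hq : q = x.2 := congrArg Prod.snd hpe
            have h3 : y.2 ≤ q := hmax y (by simp) (by omega)
            omega
          · exact ⟨hmem', fun p hp hpv => hmax p (List.mem_cons_of_mem _ hp) hpv⟩
      · rw [if_neg he]
        have hbig : ∀ p ∈ y :: t', x.1 < p.1 := pv_head_lt x y t' h he
        constructor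
        · intro hp
          rcases List.mem_cons.mp hp with hpe | hp'
          · have hv : v = x.1 := congrArg Prod.fst hpe
            have hq : q = x.2 := congrArg Prod.snd hpe
            refine ⟨by rw [hpe]; simp, ?_⟩
            intro p hpm hpv
            rcases List.mem_cons.mp hpm with hpe2 | hpm'
            · have h1 : p.2 = x.2 := congrArg Prod.snd hpe2
              omega
            · exfalso
              have h1 : x.1 < p.1 := hbig p hpm'
              omega
          · obtain ⟨hmem, hmax⟩ := (ih v q ht).mp hp'
            refine ⟨List.mem_cons_of_mem _ hmem, ?_⟩
            intro p hpm hpv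
            rcases List.mem_cons.mp hpm with hpe2 | hpm'
            · exfalso
              have h1 : x.1 < v := hbig (v, q) hmem
              have h2 : p.1 = x.1 := congrArg Prod.fst hpe2
              omega
            · exact hmax p hpm' hpv
        · rintro ⟨hmem, hmax⟩
          rcases List.mem_cons.mp hmem with hpe | hmem'
          · exact List.mem_cons.mpr (Or.inl hpe)
          · exact List.mem_cons_of_mem _ ((ih v q ht).mpr
              ⟨hmem', fun p hp hpv => hmax p (List.mem_cons_of_mem _ hp) hpv⟩)

theorem pv_lastRun_pairwise (L : List (Int × Int)) (h : L.Pairwise pvLexLt) :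
    (pvLastRun L).Pairwise (fun a b => a.1 < b.1) := by
  induction L with
  | nil => simp [pvLastRun]
  | cons x t ih =>
    cases t with
    | nil => simp [pvLastRun]
    | cons y t' =>
      have hpw := h
      rw [List.pairwise_cons] at hpw
      obtain ⟨_, ht⟩ := hpw
      rw [pvLastRun]
      by_cases he : x.1 = y.1
      · rw [if_pos he]; exact ih ht
      · rw [if_neg he]
        refine List.pairwise_cons.mpr ⟨?_, ih ht⟩
        intro p hp
        exact pv_head_lt x y t' h he p (pv_lastRun_subset _ p hp)

-- the adjacent-pair scan plus final append IS pvLastRun, projected to positions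
theorem pv_scan_eq_lastRun (L : List (Int × Int)) (hne : L ≠ []) :
    ((L.zip L.tail).filter (fun pq => decide (pq.1.1 ≠ pq.2.1))).map (fun pq => pq.1.2)
        ++ [(L.getLast hne).2]
      = (pvLastRun L).map (fun p => p.2) := by
  induction L with
  | nil => exact absurd rfl hne
  | cons x t ih =>
    cases t with
    | nil => simp [pvLastRun]
    | cons y t' =>
      have ih' := ih (by simp)
      rw [List.getLast_cons (by simp)]
      show ((((x, y) :: (y :: t').zip t').filter
          (fun pq => decide (pq.1.1 ≠ pq.2.1))).map (fun pq => pq.1.2))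
          ++ [((y :: t').getLast (by simp)).2] = _
      rw [show ((y :: t').zip ((y :: t').tail)) = ((y :: t').zip t') from rfl] at ih'
      simp only [pvLastRun]
      by_cases he : x.1 = y.1
      · rw [if_pos he, List.filter_cons, if_neg (by simp [he])]
        exact ih'
      · rw [if_neg he, List.filter_cons, if_pos (by simp [he])]
        simp only [List.map_cons, List.cons_append]
        exact congrArg (List.cons x.2) ih'

theorem pv_topA (xs : List Int) :
    solution xs = (PySem.List.sorted (pvDictA xs).items (fun p => p.1)).map (fun p => p.2) := by
  have hfst : ((pvDictA xs).items.map Prod.fst).Nodup := pv_nodup_keysA xs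
  have hsort2 := pv_sorted2_eq_sorted_fst (pvDictA xs).items hfst
  have hperm : (PySem.List.sorted (pvDictA xs).items (fun p => p.1)).Perm (pvDictA xs).items :=
    PySem.List.sorted_perm _ _ _
  have hfstS : ((PySem.List.sorted (pvDictA xs).items (fun p => p.1)).map Prod.fst).Nodup :=
    ((hperm.map Prod.fst).nodup_iff).mpr hfst
  show (PySem.Dict.ofList (PySem.List.sorted2
      ((PySem.List.pyRange 0 (PySem.List.len xs) 1).foldl
        (fun d i => d.insert (PySem.List.pyGetD xs i 0) (i + 1)) PySem.Dict.empty).items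
      (fun x => x.1) (fun x => x.2))).keys.foldl
      (fun acc i => acc ++ [(PySem.Dict.ofList (PySem.List.sorted2
      ((PySem.List.pyRange 0 (PySem.List.len xs) 1).foldl
        (fun d i => d.insert (PySem.List.pyGetD xs i 0) (i + 1)) PySem.Dict.empty).items
      (fun x => x.1) (fun x => x.2))).getD i 0]) []
    = (PySem.List.sorted (pvDictA xs).items (fun p => p.1)).map (fun p => p.2)
  have hdict : (PySem.List.pyRange 0 (PySem.List.len xs) 1).foldl
      (fun d i => d.insert (PySem.List.pyGetD xs i 0) (i + 1)) PySem.Dict.empty = pvDictA xs := by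
    rw [pvDictA, pvP, List.foldl_map, PySem.List.enumerate_eq_map_pyRange xs 0, List.foldl_map]
  rw [hdict, hsort2]
  have hitems : (PySem.Dict.ofList
      (PySem.List.sorted (pvDictA xs).items (fun p => p.1))).items
      = PySem.List.sorted (pvDictA xs).items (fun p => p.1) := by
    simp only [PySem.Dict.ofList, PySem.Dict.update]
    rw [PySem.Dict.items_foldl_insert_fresh _ (fun p : Int × Int => p.1)
      (fun p : Int × Int => p.2) _ (fun a _ => PySem.Dict.contains_empty _) hfstS]
    simp [PySem.Dict.empty]
  have hkeysfold : (PySem.Dict.ofList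
      (PySem.List.sorted (pvDictA xs).items (fun p => p.1))).keys.foldl
      (fun acc i => acc ++ [(PySem.Dict.ofList
        (PySem.List.sorted (pvDictA xs).items (fun p => p.1))).getD i 0]) []
      = (PySem.Dict.ofList
        (PySem.List.sorted (pvDictA xs).items (fun p => p.1))).items.map Prod.snd := by
    rw [PySem.List.foldl_append_singleton_eq_map]
    simp only [PySem.Dict.keys]
    rw [List.map_map, List.nil_append]
    apply List.map_congr_left
    intro p hp
    exact PySem.Dict.getD_of_mem_items _ (Prod.mk.eta (p := p) ▸ hp)
      (by simp only [PySem.Dict.keys]; rw [hitems]; exact hfstS) 0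
  rw [hkeysfold, hitems]

theorem pv_topB (xs : List Int) :
    solution_alt xs = (pvLastRun (pvS xs)).map (fun p => p.2) := by
  show (if (pvS xs).isEmpty then
        ((pvS xs).zip (PySem.List.slice (pvS xs) (some 1) none)).foldl
          (fun out pq => if pq.1.1 ≠ pq.2.1 then out ++ [pq.1.2] else out) []
      else
        ((pvS xs).zip (PySem.List.slice (pvS xs) (some 1) none)).foldl
          (fun out pq => if pq.1.1 ≠ pq.2.1 then out ++ [pq.1.2] else out) []
          ++ [(PySem.List.pyGetD (pvS xs) (-1) (0, 0)).2]) = _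
  rw [PySem.List.slice_from_one,
    PySem.List.foldl_append_ite (p := fun pq : (Int × Int) × (Int × Int) => pq.1.1 ≠ pq.2.1)
      (f := fun pq => pq.1.2)]
  cases hL : pvS xs with
  | nil => simp [pvLastRun]
  | cons a t =>
    simp only [List.isEmpty_cons]
    rw [if_neg (by simp), PySem.List.pyGetD_neg_one (a :: t) (0, 0) (by simp), List.nil_append]
    exact pv_scan_eq_lastRun (a :: t) (by simp)

theorem pv_sorted_eq (xs : List Int) :
    PySem.List.sorted (pvDictA xs).items (fun p => p.1) = pvLastRun (pvS xs) := by
  have hpwL : (pvLastRun (pvS xs)).Pairwise (fun a b => a.1 < b.1) :=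
    pv_lastRun_pairwise _ (pv_S_pairwise xs)
  have hndL : (pvLastRun (pvS xs)).Nodup := hpwL.imp (fun h he => by rw [he] at h; omega)
  have hndI : (pvDictA xs).items.Nodup := (pv_nodup_keysA xs).of_map
  have hperm : (pvLastRun (pvS xs)).Perm (pvDictA xs).items := by
    rw [List.perm_ext_iff_of_nodup hndL hndI]
    intro a
    rw [← Prod.mk.eta (p := a), pv_lastRun_mem _ a.1 a.2 (pv_S_pairwise xs), pv_items_mem]
    have hm := (pv_S_perm xs).mem_iff (a := (a.1, a.2))
    constructor
    · rintro ⟨h1, h2⟩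
      exact ⟨hm.mp h1, fun p hp hpv => h2 p ((pv_S_perm xs).mem_iff.mpr hp) hpv⟩
    · rintro ⟨h1, h2⟩
      exact ⟨hm.mpr h1, fun p hp hpv => h2 p ((pv_S_perm xs).mem_iff.mp hp) hpv⟩
  exact PySem.List.sorted_eq_of_perm_of_pairwise_lt _ _ _ hperm hpwL

-- ===== VERDICT (by name: the statement is the Claim_ definition above) =====
theorem solution_spec : Claim_equal_solution := by
  intro sequence _
  unfold Spec_solution
  rw [pv_topA, pv_topB, pv_sorted_eq]
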